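-- pv_equiv track=rewrite | github.com/miliar/Code_Jam_Webscraper | solutions_python/solutions_year16_round0_nr2/3229.py | flipPancakes
-- ===== SOURCE A (Python) =====
-- def flipPancakes(stack):
-- 	counter = 1
-- 	top = stack[0]
-- 	nextPC = stack[1]
--
-- 	#always flip at least top pancake
-- 	stack[0] = stack[0] * -1
--
--
-- 	while len(stack) != sum(stack) and len(stack) > counter and top == nextPC:
-- 		stack[counter] = stack[counter] * -1
-- 		counter = counter + 1
-- 		nextPC = stack[counter]
--
-- 	return stack
-- ===== SOURCE B (Python) =====
-- def flipPancakes(stack):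
--     # Two-phase: compute the flip length c from prefix sums, then negate stack[:c] in place.
--     n = len(stack)
--     top = stack[0]
--     total = sum(stack)
--     c = 1
--     prefix = top
--     while c < n and stack[c] == top and n != total - 2 * prefix:
--         prefix += stack[c]
--         c += 1
--     stack[:c] = [-x for x in stack[:c]]
--     return stack
-- ===== Notes on version B (the rewrite author's own statement) =====
-- stated objective: alternative
-- what changed: A mutates the stack while re-summing the whole list on every loop iteration; B first finds the flip length in one scan using a running prefix sum (never re-summing and never reading mutated state), then negates that prefix in a single slice assignment.
import Mathlib
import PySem

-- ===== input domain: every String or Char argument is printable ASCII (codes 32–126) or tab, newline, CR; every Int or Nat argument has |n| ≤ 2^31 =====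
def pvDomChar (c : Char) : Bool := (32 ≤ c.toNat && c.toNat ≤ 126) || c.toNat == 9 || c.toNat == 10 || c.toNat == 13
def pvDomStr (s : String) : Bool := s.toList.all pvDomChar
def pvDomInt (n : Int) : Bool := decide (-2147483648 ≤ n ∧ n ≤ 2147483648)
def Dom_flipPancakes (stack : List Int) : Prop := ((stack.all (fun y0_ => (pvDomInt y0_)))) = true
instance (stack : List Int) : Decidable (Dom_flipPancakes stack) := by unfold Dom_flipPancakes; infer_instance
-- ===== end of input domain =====

-- B replaces A's re-sum-each-iteration flip-as-you-go loop by one prefix-sum scan that finds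
-- the flip length, then negates that prefix in one slice; both Pythons mutate `stack` in place
-- and return it — the theorems here are about the return value.

-- ===== PORT A =====
-- A's while loop; `none` = the IndexError raised by `nextPC = stack[counter]` when counter
-- runs off the end (excluded by Pre_). fuel = stack.length + 1 always suffices.
def flipPancakesLoopA : Nat → List Int → Nat → Int → Int → Option (List Int)
  | 0, _, _, _, _ => none
  | fuel + 1, stack, counter, top, nextPC =>
    if (stack.length : Int) ≠ stack.sum ∧ counter < stack.length ∧ top = nextPC then
      -- stack[counter] *= -1 (the updated list is written out twice to keep the match structural)
      match PySem.List.pyGet? (stack.set counter (-(stack.getD counter 0))) ((counter : Int) + 1) with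
      | none => none
      | some v => flipPancakesLoopA fuel (stack.set counter (-(stack.getD counter 0))) (counter + 1) top v
    else some stack

def flipPancakes (stack : List Int) : List Int :=
  match PySem.List.pyGet? stack 0, PySem.List.pyGet? stack 1 with
  | some top, some nextPC =>
    -- stack[0] = stack[0] * -1, then the while loop
    ((flipPancakesLoopA (stack.length + 1) (stack.set 0 (-top)) 1 top nextPC).getD [])
  | _, _ => []   -- IndexError on stack[0] / stack[1] (len < 2); excluded by Pre_

-- ===== PORT B =====
-- Source B's while loop: advance c maintaining the running prefix sum; fuel = stack.length suffices.
def flipPancakesFindC (stack : List Int) (top total : Int) : Nat → Nat → Int → Nat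
  | 0, c, _ => c
  | fuel + 1, c, prefix_ =>
    if c < stack.length ∧ stack.getD c 0 = top ∧ (stack.length : Int) ≠ total - 2 * prefix_ then
      flipPancakesFindC stack top total fuel (c + 1) (prefix_ + stack.getD c 0)
    else c

def flipPancakes_alt (stack : List Int) : List Int :=
  match PySem.List.pyGet? stack 0 with
  | none => []   -- IndexError on stack[0] (empty stack); excluded by Pre_
  | some top =>
    let c := flipPancakesFindC stack top stack.sum stack.length 1 top
    (stack.take c).map (fun x => -x) ++ stack.drop c

-- ===== PRECONDITION & SPEC =====
-- Pre_ is exactly the set of inputs on which A returns: length ≥ 2 and the loop stops before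
-- falling off the end (some index c in [1, n) fails the continue condition); otherwise A
-- raises IndexError.
def Pre_flipPancakes (stack : List Int) : Prop :=
  2 ≤ stack.length ∧
  ∃ c < stack.length, 1 ≤ c ∧
    (stack.getD c 0 ≠ stack.getD 0 0 ∨
      (stack.length : Int) = stack.sum - 2 * (stack.take c).sum)
instance (stack : List Int) : Decidable (Pre_flipPancakes stack) := by
  unfold Pre_flipPancakes; infer_instance

def pvWitness_flipPancakes : List Int := [1, 1, -1]

def Spec_flipPancakes (stack : List Int) (out : List Int) : Prop := out = flipPancakes_alt stack
instance (stack : List Int) (out : List Int) : Decidable (Spec_flipPancakes stack out) := by unfold Spec_flipPancakes; infer_instance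

-- ===== CLAIM (what is proved, stated in full; the proofs are below) =====
def Claim_equal_flipPancakes : Prop := ∀ (stack : List Int), Dom_flipPancakes stack → Pre_flipPancakes stack → Spec_flipPancakes stack (flipPancakes stack)

-- ===== LEMMAS AND PROOFS =====

-- the stack after the first c pancakes have been flipped
def pvF (orig : List Int) (c : Nat) : List Int :=
  (orig.take c).map (fun x => -x) ++ orig.drop c

theorem pvF_length (orig : List Int) (c : Nat) : (pvF orig c).length = orig.length := by
  simp [pvF]; omega

theorem pv_sum_map_neg (l : List Int) : (l.map (fun x => -x)).sum = -l.sum := by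
  induction l with
  | nil => simp
  | cons x xs ih => simp [ih]; ring

theorem pvF_sum (orig : List Int) (c : Nat) :
    (pvF orig c).sum = orig.sum - 2 * (orig.take c).sum := by
  have h := List.sum_take_add_sum_drop orig c
  rw [pvF, List.sum_append, pv_sum_map_neg]
  omega

theorem pvF_getElem? (orig : List Int) (c i : Nat) (h : c ≤ i) (hc : c ≤ orig.length) :
    (pvF orig c)[i]? = orig[i]? := by
  rw [pvF, List.getElem?_append_right (by simp; omega)]
  simp [List.getElem?_drop]
  congr 1
  omega

theorem pvF_getD (orig : List Int) (c : Nat) (h : c < orig.length) :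
    (pvF orig c).getD c 0 = orig.getD c 0 := by
  simp [List.getD, pvF_getElem? orig c c le_rfl (le_of_lt h)]

theorem pvF_set (orig : List Int) (c : Nat) (h : c < orig.length) :
    (pvF orig c).set c (-(orig.getD c 0)) = pvF orig (c + 1) := by
  have hlen : ((orig.take c).map (fun x => -x)).length = c := by
    simp; omega
  rw [pvF, List.set_append_right _ _ (le_of_eq hlen), hlen, Nat.sub_self]
  rw [List.drop_eq_getElem_cons h, List.set_cons_zero]
  have h2 : c < (orig.map (fun x => -x)).length := by simpa using h
  have ht : (orig.map (fun x => -x)).take (c + 1)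
      = (orig.map (fun x => -x)).take c ++ [-orig[c]] := by
    rw [List.take_add_one, List.getElem?_eq_getElem h2]
    simp
  simp [pvF, List.getD, List.getElem?_eq_getElem h, ht]

theorem pv_take_sum_succ (orig : List Int) (c : Nat) (h : c < orig.length) :
    (orig.take (c + 1)).sum = (orig.take c).sum + orig.getD c 0 := by
  have ht : orig.take (c + 1) = orig.take c ++ [orig[c]] := by
    rw [List.take_add_one, List.getElem?_eq_getElem h]; rfl
  rw [ht, List.sum_append, List.getD, List.getElem?_eq_getElem h]
  simp

theorem pv_loop_eq (orig : List Int) (top : Int) :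
    ∀ (f1 : Nat), ∀ (c f2 : Nat) (prefix_ : Int), 1 ≤ c → c < orig.length →
    prefix_ = (orig.take c).sum →
    (∃ d, c ≤ d ∧ d < orig.length ∧
      (orig.getD d 0 ≠ top ∨ (orig.length : Int) = orig.sum - 2 * (orig.take d).sum)) →
    orig.length - c < f1 → orig.length - c ≤ f2 →
    flipPancakesLoopA f1 (pvF orig c) c top (orig.getD c 0)
      = some (pvF orig (flipPancakesFindC orig top orig.sum f2 c prefix_)) := by
  intro f1
  induction f1 with
  | zero => intro c f2 prefix_ _ hcn _ _ hf1 _; omega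
  | succ f ih =>
    intro c f2 prefix_ hc hcn hpre hstop hf1 hf2
    obtain ⟨f2', rfl⟩ : ∃ f2', f2 = f2' + 1 := ⟨f2 - 1, by omega⟩
    rw [flipPancakesLoopA, flipPancakesFindC]
    have hlenF : (pvF orig c).length = orig.length := pvF_length orig c
    have hsumF : (pvF orig c).sum = orig.sum - 2 * (orig.take c).sum := pvF_sum orig c
    by_cases hcond : orig.getD c 0 = top ∧ (orig.length : Int) ≠ orig.sum - 2 * (orig.take c).sum
    · -- loop continues
      have hA : ((pvF orig c).length : Int) ≠ (pvF orig c).sum ∧ c < (pvF orig c).length ∧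
          top = orig.getD c 0 := by
        refine ⟨?_, by omega, hcond.1.symm⟩
        rw [hlenF, hsumF]; exact hcond.2
      have hB : c < orig.length ∧ orig.getD c 0 = top ∧
          (orig.length : Int) ≠ orig.sum - 2 * prefix_ := ⟨hcn, hcond.1, hpre ▸ hcond.2⟩
      rw [if_pos hA, if_pos hB]
      have hset : (pvF orig c).set c (-((pvF orig c).getD c 0)) = pvF orig (c + 1) := by
        rw [pvF_getD orig c hcn]; exact pvF_set orig c hcn
      -- the next index must be in range, else the stop witness is contradicted
      have hnext : c + 1 < orig.length := by
        rcases hstop with ⟨d, hd1, hd2, hd3⟩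
        rcases Nat.lt_or_ge (c + 1) orig.length with h | h
        · exact h
        · have : d = c := by omega
          subst this
          rcases hd3 with h3 | h3
          · exact absurd hcond.1 h3
          · exact absurd h3 (hpre ▸ hB.2.2)
      have hget : PySem.List.pyGet? ((pvF orig c).set c (-((pvF orig c).getD c 0)))
          ((c : Int) + 1) = some (orig.getD (c + 1) 0) := by
        rw [hset]
        have : ((c : Int) + 1) = ((c + 1 : Nat) : Int) := by push_cast; ring
        rw [this, PySem.List.pyGet?_natCast]
        rw [pvF_getElem? orig (c + 1) (c + 1) le_rfl (by omega)]
        simp [List.getD, List.getElem?_eq_getElem hnext]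
      rw [hget, hset]
      have hstop' : ∃ d, c + 1 ≤ d ∧ d < orig.length ∧
          (orig.getD d 0 ≠ top ∨ (orig.length : Int) = orig.sum - 2 * (orig.take d).sum) := by
        rcases hstop with ⟨d, hd1, hd2, hd3⟩
        refine ⟨d, ?_, hd2, hd3⟩
        rcases Nat.lt_or_ge d (c + 1) with h | h
        · have : d = c := by omega
          subst this
          rcases hd3 with h3 | h3
          · exact absurd hcond.1 h3
          · exact absurd h3 (hpre ▸ hB.2.2)
        · exact h
      exact ih (c + 1) f2' (prefix_ + orig.getD c 0) (by omega) hnext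
        (by rw [hpre, pv_take_sum_succ orig c hcn]) hstop' (by omega) (by omega)
    · -- loop stops
      have hA : ¬(((pvF orig c).length : Int) ≠ (pvF orig c).sum ∧ c < (pvF orig c).length ∧
          top = orig.getD c 0) := by
        rw [hlenF, hsumF]
        intro ⟨h1, _, h3⟩
        exact hcond ⟨h3.symm, h1⟩
      have hB : ¬(c < orig.length ∧ orig.getD c 0 = top ∧
          (orig.length : Int) ≠ orig.sum - 2 * prefix_) := by
        intro ⟨_, h2, h3⟩
        exact hcond ⟨h2, hpre ▸ h3⟩
      rw [if_neg hA, if_neg hB]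

-- ===== VERDICT (by name: the statement is the Claim_ definition above) =====
theorem flipPancakes_spec : Claim_equal_flipPancakes := by
  intro stack _ hpre
  obtain ⟨hlen, d, hdlt, hd1, hd3⟩ := hpre
  show flipPancakes stack = flipPancakes_alt stack
  have h0lt : 0 < stack.length := by omega
  have h1lt : 1 < stack.length := by omega
  have h0 : PySem.List.pyGet? stack 0 = some (stack.getD 0 0) := by
    rw [PySem.List.pyGet?_zero, List.getElem?_eq_getElem h0lt]
    simp [List.getD, List.getElem?_eq_getElem h0lt]
  have h1 : PySem.List.pyGet? stack 1 = some (stack.getD 1 0) := by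
    rw [show (1 : Int) = ((1 : Nat) : Int) by norm_num, PySem.List.pyGet?_natCast,
      List.getElem?_eq_getElem h1lt]
    simp [List.getD, List.getElem?_eq_getElem h1lt]
  rw [flipPancakes, flipPancakes_alt, h0, h1]
  show (flipPancakesLoopA (stack.length + 1) (stack.set 0 (-(stack.getD 0 0))) 1
      (stack.getD 0 0) (stack.getD 1 0)).getD []
    = (stack.take (flipPancakesFindC stack (stack.getD 0 0) stack.sum stack.length 1
        (stack.getD 0 0))).map (fun x => -x)
      ++ stack.drop (flipPancakesFindC stack (stack.getD 0 0) stack.sum stack.length 1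
        (stack.getD 0 0))
  have hset1 : stack.set 0 (-(stack.getD 0 0)) = pvF stack 1 := by
    cases stack with
    | nil => simp at h0lt
    | cons x xs => simp [pvF, List.getD]
  have hpre1 : (stack.getD 0 0) = (stack.take 1).sum := by
    cases stack with
    | nil => simp at h0lt
    | cons x xs => simp [List.getD]
  rw [hset1, pv_loop_eq stack (stack.getD 0 0) (stack.length + 1) 1 stack.length
    (stack.getD 0 0) le_rfl h1lt hpre1 ⟨d, hd1, hdlt, hd3⟩ (by omega) (by omega)]
  rfl
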